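-- pv_equiv track=rewrite | github.com/WeibinMeng/LogSummary | preprocess/preprocessor.py | remove_duplicate_asterisks
-- ===== SOURCE A (Python) =====
-- def remove_duplicate_asterisks(template):
--     template = template.strip().split()
--     result = []
--     pt = 0
--     while pt < len(template):
--         result.append(template[pt])
--         if template[pt] == '*':
--             while pt < len(template) and template[pt] == '*':
--                 # getting rid of contiguous asterisks
--                 pt += 1
--         else:
--             pt += 1
--     return ' '.join(result)
-- ===== SOURCE B (Python) =====
-- def remove_duplicate_asterisks(template):
--     tokens = template.strip().split()
--     # stage 1: run-length encode consecutive equal tokens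
--     runs = []
--     for tok in tokens:
--         if runs and runs[-1][0] == tok:
--             runs[-1] = (tok, runs[-1][1] + 1)
--         else:
--             runs.append((tok, 1))
--     # stage 2: expand runs, emitting a single '*' for any '*' run
--     out = []
--     for tok, n in runs:
--         out.extend([tok] * (1 if tok == '*' else n))
--     return ' '.join(out)
-- ===== Notes on version B (the rewrite author's own statement) =====
-- stated objective: alternative
-- what changed: Replaced A's index-walking loop with a nested asterisk-skip loop by a two-stage run-length-encoding pass: first group consecutive equal tokens into (token, count) runs, then expand the runs, emitting a single asterisk for any asterisk run and the full count for every other run.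
import Mathlib
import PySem

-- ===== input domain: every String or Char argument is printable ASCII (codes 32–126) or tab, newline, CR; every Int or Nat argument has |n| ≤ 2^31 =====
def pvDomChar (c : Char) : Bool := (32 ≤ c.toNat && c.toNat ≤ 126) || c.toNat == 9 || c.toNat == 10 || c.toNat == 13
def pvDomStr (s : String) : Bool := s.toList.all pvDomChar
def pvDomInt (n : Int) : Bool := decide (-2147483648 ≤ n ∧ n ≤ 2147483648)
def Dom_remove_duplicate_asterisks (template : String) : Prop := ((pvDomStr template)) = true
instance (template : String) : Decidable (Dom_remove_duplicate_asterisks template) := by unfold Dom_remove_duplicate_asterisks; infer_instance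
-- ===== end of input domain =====

-- B replaces A's index-walking loop (with its inner asterisk-skip loop) by a
-- two-stage run-length-encoding pass: group tokens into (token, count) runs,
-- then expand the runs, emitting one '*' per '*' run. Same O(n) cost.

-- ===== PORT A =====
-- inner while: while pt < len(template) and template[pt] == '*': pt += 1
def pvSkipA : List String → List String
  | [] => []
  | t :: rest => if t == "*" then pvSkipA rest else t :: rest

theorem pvSkipA_len_le (l : List String) : (pvSkipA l).length ≤ l.length := by
  induction l with
  | nil => simp [pvSkipA]
  | cons t rest ih =>
    by_cases ht : (t == "*") = true
    · simp only [pvSkipA, if_pos ht]; exact Nat.le_succ_of_le ih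
    · simp [pvSkipA, ht]

-- outer while: state = the tokens not yet consumed (pt onwards) and the result list
def pvLoopA (rest result : List String) : List String :=
  match rest with
  | [] => result
  | t :: xs =>
    if ht : t == "*" then
      pvLoopA (pvSkipA (t :: xs)) (result ++ [t])
    else
      pvLoopA xs (result ++ [t])
termination_by rest.length
decreasing_by
  · rw [pvSkipA, if_pos ht]
    exact Nat.lt_succ_of_le (pvSkipA_len_le xs)
  · simp

def remove_duplicate_asterisks (template : String) : String :=
  let tokens := PySem.Str.split₀ (PySem.Str.strip template)
  PySem.Str.join " " (pvLoopA tokens [])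

-- ===== PORT B =====
-- stage 1 body: compare tok with the last run and bump its count, else append a new run
def pvGroupStep (runs : List (String × Nat)) (tok : String) : List (String × Nat) :=
  match runs.getLast? with
  | some (t, n) => if t == tok then runs.dropLast ++ [(tok, n + 1)] else runs ++ [(tok, 1)]
  | none => [(tok, 1)]

-- stage 2 body: out.extend([tok] * (1 if tok == '*' else n))
def pvExpandStep (out : List String) (r : String × Nat) : List String :=
  out ++ List.replicate (if r.1 == "*" then 1 else r.2) r.1

def remove_duplicate_asterisks_alt (template : String) : String :=
  let tokens := PySem.Str.split₀ (PySem.Str.strip template)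
  PySem.Str.join " " (((tokens.foldl pvGroupStep []).foldl pvExpandStep []))

-- ===== PRECONDITION & SPEC =====
def Spec_remove_duplicate_asterisks (template : String) (out : String) : Prop := out = remove_duplicate_asterisks_alt template
instance (template : String) (out : String) : Decidable (Spec_remove_duplicate_asterisks template out) := by unfold Spec_remove_duplicate_asterisks; infer_instance

-- ===== CLAIM (what is proved, stated in full; the proofs are below) =====
def Claim_equal_remove_duplicate_asterisks : Prop := ∀ (template : String), Dom_remove_duplicate_asterisks template → Spec_remove_duplicate_asterisks template (remove_duplicate_asterisks template)

-- ===== LEMMAS AND PROOFS =====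

-- the collapsed token list, as a reference function both loops are related to
def pvCollapse : List String → List String
  | [] => []
  | x :: xs =>
    if x == "*" then "*" :: pvCollapse (xs.dropWhile (· == "*"))
    else x :: pvCollapse xs
termination_by l => l.length
decreasing_by
  · exact Nat.lt_succ_of_le (List.length_dropWhile_le (· == "*") xs)
  · simp

theorem pvSkipA_eq_dropWhile (l : List String) : pvSkipA l = l.dropWhile (· == "*") := by
  induction l with
  | nil => simp [pvSkipA]
  | cons t rest ih =>
    by_cases ht : (t == "*") = true
    · simp [pvSkipA, ht, ih]
    · simp [pvSkipA, ht]

theorem pvLoopA_eq (rest result : List String) :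
    pvLoopA rest result = result ++ pvCollapse rest := by
  fun_induction pvLoopA rest result with
  | case1 result => simp [pvCollapse]
  | case2 result t xs ht ih =>
    rw [ih, pvSkipA_eq_dropWhile, pvCollapse]
    have hstar : t = "*" := by simpa using ht
    simp [hstar]
  | case3 result t xs ht ih =>
    rw [ih, pvCollapse]
    simp [ht]

-- what one run contributes to B's output
def pvExpandRun (r : String × Nat) : List String :=
  List.replicate (if r.1 == "*" then 1 else r.2) r.1

theorem pvExpandFold_eq (runs : List (String × Nat)) (acc : List String) :
    runs.foldl pvExpandStep acc = acc ++ runs.flatMap pvExpandRun := by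
  induction runs generalizing acc with
  | nil => simp
  | cons r rs ih => simp [pvExpandStep, pvExpandRun, ih]

theorem pvGroupStep_ne_nil (runs : List (String × Nat)) (tok : String) :
    pvGroupStep runs tok ≠ [] := by
  unfold pvGroupStep
  split
  · split <;> simp
  · simp

-- the step touches only the last run, so a prefix rides along unchanged
theorem pvGroupFold_prefix (l : List String) (rs s : List (String × Nat)) (hs : s ≠ []) :
    List.foldl pvGroupStep (rs ++ s) l = rs ++ List.foldl pvGroupStep s l := by
  induction l generalizing s with
  | nil => simp
  | cons x xs ih =>
    have hstep : pvGroupStep (rs ++ s) x = rs ++ pvGroupStep s x := by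
      have h1 : (rs ++ s).getLast? = s.getLast? := List.getLast?_append_of_ne_nil _ hs
      have h2 : (rs ++ s).dropLast = rs ++ s.dropLast := List.dropLast_append_of_ne_nil hs
      cases h : s.getLast? with
      | none => exact absurd (List.getLast?_eq_none_iff.mp h) hs
      | some r =>
        cases r with
        | mk t n =>
          by_cases hc : t = x <;> simp [pvGroupStep, h1, h2, h, hc]
    simp only [List.foldl_cons, hstep]
    exact ih _ (pvGroupStep_ne_nil s x)

theorem pvGroupFold_single (l : List String) (t : String) (n : Nat) :
    (List.foldl pvGroupStep [(t, n)] l).flatMap pvExpandRun =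
      (if t == "*" then "*" :: pvCollapse (l.dropWhile (· == "*"))
       else List.replicate n t ++ pvCollapse l) := by
  induction l generalizing t n with
  | nil => by_cases ht : t = "*" <;> simp [pvExpandRun, ht, pvCollapse]
  | cons x xs ih =>
    simp only [List.foldl_cons]
    by_cases hx : t = x
    · subst hx
      have : pvGroupStep [(t, n)] t = [(t, n + 1)] := by simp [pvGroupStep]
      rw [this, ih]
      by_cases ht : t = "*"
      · simp [ht]
      · simp [ht, pvCollapse, List.replicate_succ']
    · have : pvGroupStep [(t, n)] x = [(t, n)] ++ [(x, 1)] := by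
        simp [pvGroupStep, hx]
      rw [this, pvGroupFold_prefix _ _ _ (by simp), List.flatMap_append, ih]
      by_cases ht : t = "*" <;> by_cases hxs : x = "*" <;>
        simp_all [pvExpandRun, pvCollapse]

theorem pvGroupExpand_eq (tokens : List String) :
    (tokens.foldl pvGroupStep []).foldl pvExpandStep [] = pvCollapse tokens := by
  cases tokens with
  | nil => simp [pvCollapse]
  | cons x xs =>
    rw [pvExpandFold_eq]
    simp only [List.foldl_cons]
    have : pvGroupStep [] x = [(x, 1)] := by simp [pvGroupStep]
    rw [this, pvGroupFold_single]
    by_cases hx : x = "*" <;> simp [hx, pvCollapse]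

-- ===== VERDICT (by name: the statement is the Claim_ definition above) =====
theorem remove_duplicate_asterisks_spec : Claim_equal_remove_duplicate_asterisks := by
  intro template _
  unfold Spec_remove_duplicate_asterisks
  show PySem.Str.join " " (pvLoopA (PySem.Str.split₀ (PySem.Str.strip template)) []) =
    remove_duplicate_asterisks_alt template
  show _ = PySem.Str.join " "
    ((List.foldl pvGroupStep [] (PySem.Str.split₀ (PySem.Str.strip template))).foldl pvExpandStep [])
  rw [pvLoopA_eq, pvGroupExpand_eq]
  simp
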